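-- pv_equiv track=rewrite | github.com/fp-computer-programming/hw-8-2-p22melsheikh | hw8-2-5.py | sum_no_odd
-- ===== SOURCE A (Python) =====
-- def sum_no_odd(num):
--     total = 0
--     z = 0
--     for x in num:
--         if z < len(num):
--             if x % 2 == 0:
--                 total += x
--             elif x % 2 != 0:
--                 z += len(num)
--     return total
-- ===== SOURCE B (Python) =====
-- def sum_no_odd(num):
--     if not num or num[0] % 2 != 0:
--         return 0
--     return num[0] + sum_no_odd(num[1:])
-- ===== Notes on version B (the rewrite author's own statement) =====
-- stated objective: simpler
-- what changed: Replaced the sentinel-counter full scan (z jumps past len(num) at the first odd so later iterations add nothing) by direct structural recursion that stops at the first odd element.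
import Mathlib
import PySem

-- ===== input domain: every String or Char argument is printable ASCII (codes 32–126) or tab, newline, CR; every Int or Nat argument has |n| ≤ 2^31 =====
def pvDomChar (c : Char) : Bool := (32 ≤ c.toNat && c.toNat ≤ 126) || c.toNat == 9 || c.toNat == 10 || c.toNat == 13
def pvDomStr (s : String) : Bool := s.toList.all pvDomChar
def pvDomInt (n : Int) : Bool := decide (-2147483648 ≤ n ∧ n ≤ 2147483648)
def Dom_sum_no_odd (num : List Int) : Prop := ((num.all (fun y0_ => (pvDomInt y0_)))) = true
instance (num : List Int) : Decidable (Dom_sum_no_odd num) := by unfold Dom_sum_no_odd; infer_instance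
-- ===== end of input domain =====

-- ===== PORT A =====
-- total = 0; z = 0; for x in num: if z < len(num): if x%2==0: total+=x elif x%2!=0: z+=len(num)
def sum_no_odd (num : List Int) : Int :=
  (num.foldl (fun (st : Int × Int) x =>
    if st.2 < (num.length : Int) then
      if PySem.Int.mod x 2 == 0 then (st.1 + x, st.2)
      else if PySem.Int.mod x 2 != 0 then (st.1, st.2 + (num.length : Int))
      else st
    else st) (0, 0)).1

-- ===== PORT B =====
-- B: structural recursion; stops at the first odd element
def sum_no_odd_alt (num : List Int) : Int :=
  match num with
  | [] => 0
  | x :: xs => if PySem.Int.mod x 2 != 0 then 0 else x + sum_no_odd_alt xs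

-- ===== PRECONDITION & SPEC =====
def Spec_sum_no_odd (num : List Int) (out : Int) : Prop := out = sum_no_odd_alt num
instance (num : List Int) (out : Int) : Decidable (Spec_sum_no_odd num out) := by unfold Spec_sum_no_odd; infer_instance

-- ===== CLAIM (what is proved, stated in full; the proofs are below) =====
def Claim_equal_sum_no_odd : Prop := ∀ (num : List Int), Dom_sum_no_odd num → Spec_sum_no_odd num (sum_no_odd num)

-- ===== LEMMAS AND PROOFS =====

-- ===== VERDICT (by name: the statement is the Claim_ definition above) =====
-- the loop body of A, abstracted over the (constant) length n
def pvStepA (n : Int) (st : Int × Int) (x : Int) : Int × Int :=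
  if st.2 < n then
    if PySem.Int.mod x 2 == 0 then (st.1 + x, st.2)
    else if PySem.Int.mod x 2 != 0 then (st.1, st.2 + n)
    else st
  else st

theorem foldA_stuck (n : Int) (l : List Int) (t z : Int) (h : n ≤ z) :
    l.foldl (pvStepA n) (t, z) = (t, z) := by
  induction l with
  | nil => rfl
  | cons x xs ih => simp [List.foldl, pvStepA, not_lt.mpr h, ih]

theorem foldA_run (n : Int) (l : List Int) (t : Int) (hn : 1 ≤ n) :
    (l.foldl (pvStepA n) (t, 0)).1 = t + sum_no_odd_alt l := by
  induction l generalizing t with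
  | nil => simp [sum_no_odd_alt]
  | cons x xs ih =>
    have hn0 : (0:Int) < n := hn
    by_cases he : 2 ∣ x
    · have ho : ¬ (x % 2 = 1) := by omega
      simp [List.foldl, pvStepA, hn0, he, ih, sum_no_odd_alt]
      ring
    · have ho : x % 2 = 1 := by omega
      simp [List.foldl, pvStepA, hn0, ho, sum_no_odd_alt,
        foldA_stuck n xs t n le_rfl]

theorem sum_no_odd_spec : Claim_equal_sum_no_odd := by
  intro num _
  unfold Spec_sum_no_odd
  cases num with
  | nil => rfl
  | cons x xs =>
    have h : sum_no_odd (x :: xs)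
        = ((x :: xs).foldl (pvStepA ((x :: xs).length : Int)) (0, 0)).1 := rfl
    rw [h, foldA_run _ _ _ (by simp)]
    simp
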